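-- pv_equiv track=rewrite | github.com/kevint1814/VetLayer | backend/app/services/soft_skill_detector.py | get_soft_skill_gaps_for_role
-- ===== SOURCE A (Python) =====
-- from typing import Dict, Any, List
--
-- def get_soft_skill_gaps_for_role(
--     soft_skill_result: dict,
--     job_title: str = "",
--     role_type: str = "hybrid",
-- ) -> List[Dict[str, str]]:
--     """
--     Identify soft skill gaps based on what the role typically requires.
--
--     Returns list of gap descriptions for risk flag generation.
--     """
--     gaps = []
--     title_lower = job_title.lower()
--     summary = soft_skill_result.get("summary", {})
--
--     # Leadership expectation based on title
--     leadership_titles = ["manager", "director", "head", "lead", "vp", "vice president", "chief", "senior"]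
--     expects_leadership = any(kw in title_lower for kw in leadership_titles)
--
--     if expects_leadership and summary.get("leadership", {}).get("count", 0) == 0:
--         gaps.append({
--             "category": "leadership",
--             "title": "No leadership evidence detected",
--             "description": (
--                 f"The role '{job_title}' typically requires leadership experience, "
--                 f"but no evidence of team management, mentoring, or people leadership "
--                 f"was found in the resume. Probe leadership experience in the interview."
--             ),
--             "severity": "medium",
--         })
--
--     # Communication expectation
--     comm_titles = ["director", "vp", "head", "client", "customer", "account", "sales", "marketing", "communications"]
--     expects_communication = any(kw in title_lower for kw in comm_titles)
--
--     if expects_communication and summary.get("communication", {}).get("count", 0) == 0: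
--         gaps.append({
--             "category": "communication",
--             "title": "No communication evidence detected",
--             "description": (
--                 f"The role '{job_title}' typically requires strong communication skills, "
--                 f"but no evidence of presentations, stakeholder communication, or technical writing "
--                 f"was found in the resume."
--             ),
--             "severity": "low",
--         })
--
--     # Strategic thinking for senior roles
--     strategic_titles = ["director", "vp", "vice president", "chief", "head of", "general manager"]
--     expects_strategic = any(kw in title_lower for kw in strategic_titles)
--
--     if expects_strategic and summary.get("strategic_thinking", {}).get("count", 0) == 0:
--         gaps.append({
--             "category": "strategic_thinking",
--             "title": "No strategic thinking evidence detected",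
--             "description": (
--                 f"The role '{job_title}' typically requires strategic thinking, "
--                 f"but no evidence of roadmap development, business impact metrics, "
--                 f"or strategic planning was found in the resume."
--             ),
--             "severity": "low",
--         })
--
--     return gaps
-- ===== SOURCE B (Python) =====
-- # Inverted-index rewrite: each distinct keyword is tested against the title ONCE and maps
-- # to the set of categories it triggers; A instead re-tests shared keywords per category.
--
-- _KEYWORD_CATS = {
--     "manager": ("leadership",),
--     "director": ("leadership", "communication", "strategic_thinking"),
--     "head": ("leadership", "communication"),
--     "lead": ("leadership",),
--     "vp": ("leadership", "communication", "strategic_thinking"),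
--     "vice president": ("leadership", "strategic_thinking"),
--     "chief": ("leadership", "strategic_thinking"),
--     "senior": ("leadership",),
--     "client": ("communication",),
--     "customer": ("communication",),
--     "account": ("communication",),
--     "sales": ("communication",),
--     "marketing": ("communication",),
--     "communications": ("communication",),
--     "head of": ("strategic_thinking",),
--     "general manager": ("strategic_thinking",),
-- }
--
-- _GAP_TEXT = {
--     "leadership": (
--         "No leadership evidence detected",
--         "' typically requires leadership experience, but no evidence of team management, "
--         "mentoring, or people leadership was found in the resume. "
--         "Probe leadership experience in the interview.",
--         "medium"),
--     "communication": (
--         "No communication evidence detected",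
--         "' typically requires strong communication skills, but no evidence of presentations, "
--         "stakeholder communication, or technical writing was found in the resume.",
--         "low"),
--     "strategic_thinking": (
--         "No strategic thinking evidence detected",
--         "' typically requires strategic thinking, but no evidence of roadmap development, "
--         "business impact metrics, or strategic planning was found in the resume.",
--         "low"),
-- }
--
--
-- def get_soft_skill_gaps_for_role(soft_skill_result, job_title="", role_type="hybrid"):
--     title_lower = job_title.lower()
--     summary = soft_skill_result.get("summary", {})
--     expected = set()
--     for kw, cats in _KEYWORD_CATS.items():
--         if kw in title_lower:
--             expected.update(cats)
--     gaps = []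
--     for cat, (title, tail, severity) in _GAP_TEXT.items():
--         if cat in expected and summary.get(cat, {}).get("count", 0) == 0:
--             gaps.append({
--                 "category": cat,
--                 "title": title,
--                 "description": "The role '" + job_title + tail,
--                 "severity": severity,
--             })
--     return gaps
-- ===== Notes on version B (the rewrite author's own statement) =====
-- stated objective: alternative
-- what changed: B inverts the data: a keyword-to-categories index is scanned once, each distinct keyword tested against the title exactly once to build a set of expected categories, and gaps are then emitted from a category table by set membership; A instead runs three independent per-category keyword scans, re-testing shared keywords like 'director' and 'vp' per category.
import Mathlib
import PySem

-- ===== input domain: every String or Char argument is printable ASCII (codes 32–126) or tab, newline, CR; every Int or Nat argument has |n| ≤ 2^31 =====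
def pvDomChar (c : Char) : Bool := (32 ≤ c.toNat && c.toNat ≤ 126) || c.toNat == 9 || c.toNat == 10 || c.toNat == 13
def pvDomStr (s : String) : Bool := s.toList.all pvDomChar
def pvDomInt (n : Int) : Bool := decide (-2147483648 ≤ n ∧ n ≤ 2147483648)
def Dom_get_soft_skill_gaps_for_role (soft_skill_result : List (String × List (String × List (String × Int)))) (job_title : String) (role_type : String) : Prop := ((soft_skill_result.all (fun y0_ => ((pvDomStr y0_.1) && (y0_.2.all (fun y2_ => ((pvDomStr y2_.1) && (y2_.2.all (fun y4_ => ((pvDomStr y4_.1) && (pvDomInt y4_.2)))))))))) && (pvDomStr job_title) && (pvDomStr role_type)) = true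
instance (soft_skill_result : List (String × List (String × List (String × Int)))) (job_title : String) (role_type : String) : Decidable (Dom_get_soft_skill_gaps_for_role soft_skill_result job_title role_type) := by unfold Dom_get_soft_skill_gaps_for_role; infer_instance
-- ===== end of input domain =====

-- B inverts the data structure: one keyword→categories index, each distinct keyword tested
-- against the title once building a set of expected categories, then gaps emitted from a
-- category table by set membership (objective: alternative). role_type is unused by both.

-- ===== PORT A =====
def get_soft_skill_gaps_for_role (soft_skill_result : List (String × List (String × List (String × Int)))) (job_title : String) (role_type : String) : List (List (String × String)) :=
  let gaps : List (List (String × String)) := []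
  let title_lower := PySem.Str.lower job_title
  let summary : List (String × List (String × Int)) := PySem.Dict.getD (PySem.Dict.mk soft_skill_result) "summary" []
  let leadership_titles := ["manager", "director", "head", "lead", "vp", "vice president", "chief", "senior"]
  let expects_leadership := leadership_titles.any (fun kw => PySem.Str.isIn kw title_lower)
  let gaps := if expects_leadership && (PySem.Dict.getD (PySem.Dict.mk (PySem.Dict.getD (PySem.Dict.mk summary) "leadership" [])) "count" 0 == 0) then
      gaps ++ [[("category", "leadership"),
                ("title", "No leadership evidence detected"),
                ("description", "The role '" ++ job_title ++ "' typically requires leadership experience, but no evidence of team management, mentoring, or people leadership was found in the resume. Probe leadership experience in the interview."),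
                ("severity", "medium")]]
    else gaps
  let comm_titles := ["director", "vp", "head", "client", "customer", "account", "sales", "marketing", "communications"]
  let expects_communication := comm_titles.any (fun kw => PySem.Str.isIn kw title_lower)
  let gaps := if expects_communication && (PySem.Dict.getD (PySem.Dict.mk (PySem.Dict.getD (PySem.Dict.mk summary) "communication" [])) "count" 0 == 0) then
      gaps ++ [[("category", "communication"),
                ("title", "No communication evidence detected"),
                ("description", "The role '" ++ job_title ++ "' typically requires strong communication skills, but no evidence of presentations, stakeholder communication, or technical writing was found in the resume."),
                ("severity", "low")]]
    else gaps
  let strategic_titles := ["director", "vp", "vice president", "chief", "head of", "general manager"]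
  let expects_strategic := strategic_titles.any (fun kw => PySem.Str.isIn kw title_lower)
  let gaps := if expects_strategic && (PySem.Dict.getD (PySem.Dict.mk (PySem.Dict.getD (PySem.Dict.mk summary) "strategic_thinking" [])) "count" 0 == 0) then
      gaps ++ [[("category", "strategic_thinking"),
                ("title", "No strategic thinking evidence detected"),
                ("description", "The role '" ++ job_title ++ "' typically requires strategic thinking, but no evidence of roadmap development, business impact metrics, or strategic planning was found in the resume."),
                ("severity", "low")]]
    else gaps
  gaps

-- ===== PORT B =====
-- inverted index: keyword → categories it triggers
def kwCats : List (String × List String) :=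
  [("manager", ["leadership"]),
   ("director", ["leadership", "communication", "strategic_thinking"]),
   ("head", ["leadership", "communication"]),
   ("lead", ["leadership"]),
   ("vp", ["leadership", "communication", "strategic_thinking"]),
   ("vice president", ["leadership", "strategic_thinking"]),
   ("chief", ["leadership", "strategic_thinking"]),
   ("senior", ["leadership"]),
   ("client", ["communication"]),
   ("customer", ["communication"]),
   ("account", ["communication"]),
   ("sales", ["communication"]),
   ("marketing", ["communication"]),
   ("communications", ["communication"]),
   ("head of", ["strategic_thinking"]),
   ("general manager", ["strategic_thinking"])]

-- (category, title, description tail after the quoted job title, severity)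
def gapText : List (String × String × String × String) :=
  [("leadership", "No leadership evidence detected",
    "' typically requires leadership experience, but no evidence of team management, mentoring, or people leadership was found in the resume. Probe leadership experience in the interview.",
    "medium"),
   ("communication", "No communication evidence detected",
    "' typically requires strong communication skills, but no evidence of presentations, stakeholder communication, or technical writing was found in the resume.",
    "low"),
   ("strategic_thinking", "No strategic thinking evidence detected",
    "' typically requires strategic thinking, but no evidence of roadmap development, business impact metrics, or strategic planning was found in the resume.",
    "low")]

def get_soft_skill_gaps_for_role_alt (soft_skill_result : List (String × List (String × List (String × Int)))) (job_title : String) (role_type : String) : List (List (String × String)) :=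
  let title_lower := PySem.Str.lower job_title
  let summary : List (String × List (String × Int)) := PySem.Dict.getD (PySem.Dict.mk soft_skill_result) "summary" []
  let expected : PySem.Set String :=
    kwCats.foldl (fun s p => if PySem.Str.isIn p.1 title_lower then PySem.Set.update s p.2 else s) PySem.Set.empty
  gapText.filterMap (fun g =>
    if PySem.Set.contains expected g.1
        && (PySem.Dict.getD (PySem.Dict.mk (PySem.Dict.getD (PySem.Dict.mk summary) g.1 [])) "count" 0 == 0) then
      some [("category", g.1),
            ("title", g.2.1),
            ("description", "The role '" ++ job_title ++ g.2.2.1),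
            ("severity", g.2.2.2)]
    else none)

-- ===== PRECONDITION & SPEC =====
def Spec_get_soft_skill_gaps_for_role (soft_skill_result : List (String × List (String × List (String × Int)))) (job_title : String) (role_type : String) (out : List (List (String × String))) : Prop := out = get_soft_skill_gaps_for_role_alt soft_skill_result job_title role_type
instance (soft_skill_result : List (String × List (String × List (String × Int)))) (job_title : String) (role_type : String) (out : List (List (String × String))) : Decidable (Spec_get_soft_skill_gaps_for_role soft_skill_result job_title role_type out) := by unfold Spec_get_soft_skill_gaps_for_role; infer_instance

-- ===== CLAIM =====
def Claim_equal_get_soft_skill_gaps_for_role : Prop := ∀ (soft_skill_result : List (String × List (String × List (String × Int)))) (job_title : String) (role_type : String), Dom_get_soft_skill_gaps_for_role soft_skill_result job_title role_type → Spec_get_soft_skill_gaps_for_role soft_skill_result job_title role_type (get_soft_skill_gaps_for_role soft_skill_result job_title role_type)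

-- ===== LEMMAS AND PROOFS =====

-- membership in the fold that builds `expected`: x is collected iff some matching keyword lists it
theorem mem_foldExpected (L : List (String × List String)) (c : String → Bool) (s : PySem.Set String) (x : String) :
    x ∈ L.foldl (fun s p => if c p.1 then PySem.Set.update s p.2 else s) s ↔
      x ∈ s ∨ ∃ p ∈ L, c p.1 = true ∧ x ∈ p.2 := by
  induction L generalizing s with
  | nil => simp
  | cons hd tl ih =>
    simp only [List.foldl_cons]
    by_cases h : c hd.1 = true
    · rw [if_pos h, ih]
      simp only [PySem.Set.mem_update, List.mem_cons]
      constructor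
      · rintro (⟨h1|h1⟩|⟨p,hp,hc,hx⟩)
        · exact Or.inl h1
        · exact Or.inr ⟨hd, Or.inl rfl, h, h1⟩
        · exact Or.inr ⟨p, Or.inr hp, hc, hx⟩
      · rintro (h1|⟨p,hp|hp,hc,hx⟩)
        · exact Or.inl (Or.inl h1)
        · exact Or.inl (Or.inr (hp ▸ hx))
        · exact Or.inr ⟨p, hp, hc, hx⟩
    · rw [if_neg h, ih]
      constructor
      · rintro (h1|⟨p,hp,hc,hx⟩); · exact Or.inl h1
        exact Or.inr ⟨p, List.mem_cons_of_mem _ hp, hc, hx⟩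
      · rintro (h1|⟨p,hp,hc,hx⟩); · exact Or.inl h1
        rcases List.mem_cons.mp hp with rfl|hp
        · exact absurd hc h
        · exact Or.inr ⟨p, hp, hc, hx⟩

theorem contains_expected (t x : String) :
    PySem.Set.contains
      (kwCats.foldl (fun s p => if PySem.Str.isIn p.1 t then PySem.Set.update s p.2 else s) PySem.Set.empty) x
      = true ↔ ∃ p ∈ kwCats, PySem.Str.isIn p.1 t = true ∧ x ∈ p.2 := by
  rw [PySem.Set.contains_iff, mem_foldExpected kwCats (fun k => PySem.Str.isIn k t)]
  simp [PySem.Set.empty]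

-- each category's membership in `expected` equals A's per-category keyword scan
theorem contains_expected_leadership (t : String) : PySem.Set.contains
      (kwCats.foldl (fun s p => if PySem.Str.isIn p.1 t then PySem.Set.update s p.2 else s) PySem.Set.empty) "leadership"
      = (["manager", "director", "head", "lead", "vp", "vice president", "chief", "senior"].any (fun kw => PySem.Str.isIn kw t)) := by
  rw [Bool.eq_iff_iff, contains_expected]
  simp [kwCats]

theorem contains_expected_communication (t : String) : PySem.Set.contains
      (kwCats.foldl (fun s p => if PySem.Str.isIn p.1 t then PySem.Set.update s p.2 else s) PySem.Set.empty) "communication"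
      = (["director", "vp", "head", "client", "customer", "account", "sales", "marketing", "communications"].any (fun kw => PySem.Str.isIn kw t)) := by
  rw [Bool.eq_iff_iff, contains_expected]
  simp [kwCats]
  tauto

theorem contains_expected_strategic (t : String) : PySem.Set.contains
      (kwCats.foldl (fun s p => if PySem.Str.isIn p.1 t then PySem.Set.update s p.2 else s) PySem.Set.empty) "strategic_thinking"
      = (["director", "vp", "vice president", "chief", "head of", "general manager"].any (fun kw => PySem.Str.isIn kw t)) := by
  rw [Bool.eq_iff_iff, contains_expected]
  simp [kwCats]

-- ===== VERDICT =====
theorem get_soft_skill_gaps_for_role_spec : Claim_equal_get_soft_skill_gaps_for_role := by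
  intro ssr jt rt _
  unfold Spec_get_soft_skill_gaps_for_role get_soft_skill_gaps_for_role get_soft_skill_gaps_for_role_alt gapText
  dsimp only
  simp only [List.filterMap_cons, List.filterMap_nil,
    contains_expected_leadership, contains_expected_communication, contains_expected_strategic]
  split_ifs <;> rfl
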